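-- pv_equiv track=rewrite | github.com/zhaowj1107/CS5001 | HW4/booktitle.py | has_special_characters
-- ===== SOURCE A (Python) =====
-- def has_special_characters(title: str, num: int = 1):
--     """
--     function name: has_special_characters
--     checks if the title contains at least one special character from !.;:&
--
--     >>> has_special_characters("Title with! special")
--     True
--     >>> has_special_characters("Title without special", 0)
--     True
--     >>> has_special_characters("Title without special")
--     False
--     >>> has_special_characters("Title with:::: special", 3)
--     True
--     >>> has_special_characters("Title with. special")
--     True
--     >>> has_special_characters("Title with& special", 2)
--     False
--     """
--     SPECIAL = '!.;:&'
--     counter = 0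
--     for symbol in SPECIAL:
--         counter += title.count(symbol)
--     if counter >= num:
--         return True
--     else:
--         return False
-- ===== SOURCE B (Python) =====
-- def has_special_characters(title: str, num: int = 1):
--     counter = 0
--     for ch in title:
--         if ch in '!.;:&':
--             counter += 1
--     return counter >= num
-- ===== Notes on version B (the rewrite author's own statement) =====
-- stated objective: idiomatic
-- what changed: B makes a single pass over the title with a running counter and a per-character membership test, instead of A's five separate title.count scans (one per special character).
import Mathlib
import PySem

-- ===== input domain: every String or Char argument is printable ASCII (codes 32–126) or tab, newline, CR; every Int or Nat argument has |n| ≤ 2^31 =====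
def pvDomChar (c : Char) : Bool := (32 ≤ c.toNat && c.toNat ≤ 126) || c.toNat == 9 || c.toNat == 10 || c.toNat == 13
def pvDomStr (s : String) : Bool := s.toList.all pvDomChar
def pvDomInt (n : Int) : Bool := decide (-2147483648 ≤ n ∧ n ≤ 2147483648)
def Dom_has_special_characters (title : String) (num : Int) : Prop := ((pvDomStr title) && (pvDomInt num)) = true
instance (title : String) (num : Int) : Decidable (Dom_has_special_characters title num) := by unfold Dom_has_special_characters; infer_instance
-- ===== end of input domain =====

-- B replaces A's five separate per-character count scans with a single pass over
-- the title maintaining one counter (objective: idiomatic single traversal).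


-- ===== PORT A =====
-- A: counter = 0; for symbol in '!.;:&': counter += title.count(symbol); return counter >= num
def has_special_characters (title : String) (num : Int) : Bool :=
  let counter : Int :=
    "!.;:&".toList.foldl (fun acc sym => acc + (PySem.Str.count title (String.ofList [sym]) : Int)) 0
  if counter ≥ num then true else false

-- ===== PORT B =====
-- B: one pass over title; counter += 1 whenever the character is in '!.;:&'
def has_special_characters_alt (title : String) (num : Int) : Bool :=
  let counter : Int :=
    title.toList.foldl (fun acc ch => if "!.;:&".toList.contains ch then acc + 1 else acc) 0
  decide (counter ≥ num)

-- ===== PRECONDITION & SPEC =====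
def Spec_has_special_characters (title : String) (num : Int) (out : Bool) : Prop := out = has_special_characters_alt title num
instance (title : String) (num : Int) (out : Bool) : Decidable (Spec_has_special_characters title num out) := by unfold Spec_has_special_characters; infer_instance

-- ===== CLAIM (what is proved, stated in full; the proofs are below) =====
def Claim_equal_has_special_characters : Prop := ∀ (title : String) (num : Int), Dom_has_special_characters title num → Spec_has_special_characters title num (has_special_characters title num)

-- ===== LEMMAS AND PROOFS =====

-- count.go with a single-character pattern counts occurrences of that character
theorem pv_go_single (c : Char) (fuel : Nat) : ∀ (l : List Char) (acc : Nat),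
    l.length ≤ fuel → PySem.Chars.count.go [c] fuel l acc = acc + l.count c := by
  induction fuel with
  | zero =>
    intro l acc h
    have : l = [] := List.length_eq_zero_iff.mp (Nat.le_zero.mp h)
    subst this; simp [PySem.Chars.count.go]
  | succ n ih =>
    intro l acc h
    cases l with
    | nil => simp [PySem.Chars.count.go]
    | cons x t =>
      simp only [PySem.Chars.count.go]
      by_cases hx : c = x
      · subst hx
        have hp : List.isPrefixOf [c] (c :: t) = true := by simp [List.isPrefixOf]
        simp only [hp, if_true, List.length_cons, List.drop_succ_cons, List.length_nil,
          List.drop_zero]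
        rw [ih t (acc + 1) (by simpa using Nat.lt_succ_iff.mp (by simpa using h))]
        simp
        omega
      · have hp : List.isPrefixOf [c] (x :: t) = false := by
          simp [List.isPrefixOf, hx]
        simp only [hp]
        rw [ih t acc (by simpa using Nat.lt_succ_iff.mp (by simpa using h))]
        simp [Ne.symm hx]

theorem pv_count_single (s : String) (c : Char) :
    PySem.Str.count s (String.ofList [c]) = s.toList.count c := by
  rw [PySem.Str.count_eq]
  have h1 : (String.ofList [c]).toList = [c] := by simp
  rw [h1]
  unfold PySem.Chars.count
  simp only [List.isEmpty_cons]
  exact pv_go_single c s.toList.length s.toList 0 (le_refl _) |>.trans (by simp)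

theorem pv_countP_split (l : List Char) :
    (l.countP (fun ch => ("!.;:&".toList.contains ch)) : Int) =
      (l.count '!' : Int) + l.count '.' + l.count ';' + l.count ':' + l.count '&' := by
  induction l with
  | nil => simp
  | cons h t ih =>
    have hs : "!.;:&".toList = ['!', '.', ';', ':', '&'] := rfl
    simp only [List.countP_cons, List.count_cons, hs]
    by_cases h1 : h = '!' <;> by_cases h2 : h = '.' <;> by_cases h3 : h = ';' <;>
      by_cases h4 : h = ':' <;> by_cases h5 : h = '&' <;>
      simp_all <;> omega

theorem has_special_characters_eq (title : String) (num : Int) :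
    has_special_characters title num = has_special_characters_alt title num := by
  simp only [has_special_characters, has_special_characters_alt]
  rw [PySem.List.foldl_ite_add_one]
  simp only [Bool.decide_eq_true]
  have hA : ("!.;:&".toList.foldl
      (fun acc sym => acc + (PySem.Str.count title (String.ofList [sym]) : Int)) 0) =
      (title.toList.count '!' : Int) + title.toList.count '.' + title.toList.count ';' +
        title.toList.count ':' + title.toList.count '&' := by
    show ((['!', '.', ';', ':', '&'] : List Char).foldl _ 0) = _
    simp only [List.foldl_cons, List.foldl_nil, pv_count_single]
    ring
  rw [hA, pv_countP_split]
  simp [ge_iff_le]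

-- ===== VERDICT (by name: the statement is the Claim_ definition above) =====
theorem has_special_characters_spec : Claim_equal_has_special_characters := by
  intro title num _
  exact has_special_characters_eq title num
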